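-- pv_equiv track=rewrite | github.com/Ishan1819/PaperIQ-AI-Powered-Research-Insight-Analyzer | research-paper-chatbot/backend.py | clean_section_content
-- ===== SOURCE A (Python) =====
-- def clean_section_content(text: str) -> str:
--     lines = []
--     for line in text.split('\n'):
--         line = line.strip()
--         line = ' '.join([w for w in line.split()
--                         if not (w.replace('.', '').isdigit() or w.strip('()').isdigit())])
--         if line:
--             lines.append(line)
--     return ' '.join(lines)
-- ===== SOURCE B (Python) =====
-- def clean_section_content(text: str) -> str:
--     return ' '.join(w for w in text.split()
--                     if not (w.replace('.', '').isdigit() or w.strip('()').isdigit()))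
-- ===== Notes on version B (the rewrite author's own statement) =====
-- stated objective: simpler
-- what changed: Replaces the two-level per-line traversal (split on newlines, strip, split each line, join each line, collect nonempty lines, join again) by one flat pass: split the whole text on whitespace once, filter the numeric tokens, join once.
import Mathlib
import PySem

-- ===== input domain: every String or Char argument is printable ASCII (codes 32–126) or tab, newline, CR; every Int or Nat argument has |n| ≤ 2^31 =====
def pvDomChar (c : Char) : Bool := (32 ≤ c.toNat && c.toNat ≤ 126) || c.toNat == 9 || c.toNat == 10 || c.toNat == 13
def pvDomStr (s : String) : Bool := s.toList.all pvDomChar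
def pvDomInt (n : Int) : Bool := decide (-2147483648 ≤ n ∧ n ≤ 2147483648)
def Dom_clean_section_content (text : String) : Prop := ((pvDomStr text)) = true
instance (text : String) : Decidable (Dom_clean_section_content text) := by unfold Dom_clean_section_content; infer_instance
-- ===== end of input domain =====

-- B replaces A's two-level traversal (split into lines, strip, split each line, join each line,
-- collect the nonempty lines, join again) by one flat whitespace-token pass with the same numeric
-- filter: simpler, same result.

-- shared token predicate, both Pythons contain it verbatim: w.replace('.', '').isdigit() or w.strip('()').isdigit()
def pvIsNumericToken (w : String) : Bool :=
  PySem.Str.strIsdigit (PySem.Str.replace w "." "") || PySem.Str.strIsdigit (PySem.Str.stripChars w "()")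

-- ===== PORT A =====
-- ("\n" is a nonempty separator, so split? always returns some; .getD [] only makes that total)
def clean_section_content (text : String) : String :=
  let lines := ((PySem.Str.split? text "\n").getD []).foldl
    (fun acc line =>
      let line2 := PySem.Str.strip line
      let line3 := PySem.Str.join " " ((PySem.Str.split₀ line2).filter (fun w => !pvIsNumericToken w))
      if line3.toList.isEmpty then acc else acc ++ [line3]) []
  PySem.Str.join " " lines

-- ===== PORT B =====
def clean_section_content_alt (text : String) : String :=
  PySem.Str.join " " ((PySem.Str.split₀ text).filter (fun w => !pvIsNumericToken w))

-- ===== PRECONDITION & SPEC =====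
def Spec_clean_section_content (text : String) (out : String) : Prop := out = clean_section_content_alt text
instance (text : String) (out : String) : Decidable (Spec_clean_section_content text out) := by unfold Spec_clean_section_content; infer_instance

-- ===== CLAIM (what is proved, stated in full; the proofs are below) =====
def Claim_equal_clean_section_content : Prop := ∀ (text : String), Dom_clean_section_content text → Spec_clean_section_content text (clean_section_content text)

-- ===== LEMMAS AND PROOFS =====

-- Chars-level token predicate
def pvPC (w : List Char) : Bool :=
  !(PySem.Chars.strIsdigit (PySem.Chars.replace w ['.'] []) ||
    PySem.Chars.strIsdigit (PySem.Chars.stripChars w ['(', ')']))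

-- words = whitespace split with the empty pieces dropped
def pvW (s : List Char) : List (List Char) :=
  (s.splitOnP PySem.Chars.isspace).filter (fun w => !w.isEmpty)

-- words surviving the numeric filter
def pvG (c : List Char) : List (List Char) := (pvW c).filter pvPC

theorem pvIsNumericToken_toList (w : String) : (!pvIsNumericToken w) = pvPC w.toList := by
  simp [pvIsNumericToken, pvPC, PySem.Str.strIsdigit_eq, PySem.Str.toList_replace,
    PySem.Str.toList_stripChars]

theorem pvW_ne_nil {s w : List Char} (h : w ∈ pvW s) : w ≠ [] := by
  have := List.of_mem_filter h
  simpa [List.isEmpty_iff] using this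

theorem pvG_ne_nil {c w : List Char} (h : w ∈ pvG c) : w ≠ [] :=
  pvW_ne_nil (List.mem_of_mem_filter h)

theorem pv_sp_toList : (" " : String).toList = [' '] := rfl

-- split₀.go characterised by splitOnP
theorem pv_split0_go (s : List Char) : ∀ cur acc, PySem.Chars.split₀.go s cur acc =
    acc.reverse ++ ((s.splitOnP PySem.Chars.isspace).modifyHead (cur.reverse ++ ·)).filter (fun w => !w.isEmpty) := by
  induction s with
  | nil =>
    intro cur acc
    by_cases h : cur = [] <;>
      simp [PySem.Chars.split₀.go, h, List.splitOnP_nil, List.isEmpty_iff]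
  | cons c rest ih =>
    intro cur acc
    rw [PySem.Chars.split₀.go, List.splitOnP_cons]
    by_cases hc : PySem.Chars.isspace c = true
    · rw [if_pos hc, if_pos hc, List.modifyHead_cons]
      by_cases h : cur = []
      · subst h
        rw [if_pos (by simp), ih]
        simp [show (fun x : List Char => x) = id from rfl]
      · rw [if_neg (by simpa [List.isEmpty_iff] using h), ih]
        simp [h, show (fun x : List Char => x) = id from rfl]
    · rw [if_neg hc, if_neg hc, ih, List.modifyHead_modifyHead]
      have : (fun x => (c :: cur).reverse ++ x) = ((fun x => cur.reverse ++ x) ∘ List.cons c) := by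
        funext x; simp
      rw [this]

theorem pv_split0_eq (s : List Char) : PySem.Chars.split₀ s = pvW s := by
  rw [PySem.Chars.split₀, pv_split0_go, pvW]
  simp [show (fun x : List Char => x) = id from rfl]

-- splitOn '\n' = splitOnP (· == '\n')
theorem pv_splitOn_go_nl : ∀ (fuel : Nat) (l cur : List Char) (hacc : List (List Char)),
    l.length < fuel → PySem.Chars.splitOn.go ['\n'] fuel l cur hacc =
      hacc.reverse ++ (l.splitOnP (· == '\n')).modifyHead (cur.reverse ++ ·) := by
  intro fuel
  induction fuel with
  | zero => intro l cur acc h; omega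
  | succ f ih =>
    intro l cur acc h
    cases l with
    | nil =>
      rw [PySem.Chars.splitOn.go]
      simp [List.splitOnP_nil]
      omega
    | cons c rest =>
      rw [PySem.Chars.splitOn.go, List.splitOnP_cons]
      by_cases hc : c = '\n'
      · subst hc
        rw [if_pos (by simp [List.isPrefixOf])]
        rw [ih _ _ _ (by simpa using h)]
        simp [show (fun x : List Char => x) = id from rfl]
      · rw [if_neg (by simp [List.isPrefixOf, Ne.symm hc])]
        rw [ih _ _ _ (by simpa using Nat.lt_of_succ_lt_succ (by simpa using h))]
        rw [if_neg (by simp [hc])]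
        rw [List.modifyHead_modifyHead]
        have : (fun x => (c :: cur).reverse ++ x) = ((fun x => cur.reverse ++ x) ∘ List.cons c) := by
          funext x; simp
        rw [this]

theorem pv_splitOn_nl (s : List Char) :
    PySem.Chars.splitOn s ['\n'] = s.splitOnP (· == '\n') := by
  rw [PySem.Chars.splitOn, pv_splitOn_go_nl _ _ _ _ (by omega)]
  simp [show (fun x : List Char => x) = id from rfl]

theorem pv_modifyHead_append_left {α} (f : α → α) {l : List α} (t : List α) (h : l ≠ []) :
    (l ++ t).modifyHead f = l.modifyHead f ++ t := by
  cases l with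
  | nil => exact absurd rfl h
  | cons a l => simp

-- an all-separator string splits into empty pieces
theorem pv_splitOnP_allP {p : Char → Bool} : ∀ {w : List Char}, (∀ c ∈ w, p c = true) →
    w.splitOnP p = [] :: List.replicate w.length [] := by
  intro w
  induction w with
  | nil => simp [List.splitOnP_nil]
  | cons c rest ih =>
    intro h
    rw [List.splitOnP_cons, if_pos (h c (by simp)), ih (fun d hd => h d (by simp [hd]))]
    simp [List.replicate_succ]

theorem pv_splitOnP_append_allP {p : Char → Bool} (xs : List Char) {w : List Char}
    (hw : ∀ c ∈ w, p c = true) :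
    (xs ++ w).splitOnP p = xs.splitOnP p ++ List.replicate w.length [] := by
  induction xs with
  | nil => simp [pv_splitOnP_allP hw, List.splitOnP_nil]
  | cons c rest ih =>
    rw [List.cons_append, List.splitOnP_cons, List.splitOnP_cons, ih]
    by_cases hc : p c = true
    · simp [hc]
    · rw [if_neg hc, if_neg hc, pv_modifyHead_append_left _ _ (List.splitOnP_ne_nil _ _)]

theorem pv_pvW_append_allP (xs : List Char) {w : List Char}
    (hw : ∀ c ∈ w, PySem.Chars.isspace c = true) : pvW (xs ++ w) = pvW xs := by
  rw [pvW, pvW, pv_splitOnP_append_allP xs hw, List.filter_append]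
  have : (List.replicate w.length ([] : List Char)).filter (fun w => !w.isEmpty) = [] := by
    induction w.length with
    | zero => simp
    | succ n ih => simp [List.replicate_succ, ih]
  rw [this, List.append_nil]

theorem pv_pvW_dropWhile (s : List Char) : pvW (List.dropWhile PySem.Chars.isspace s) = pvW s := by
  induction s with
  | nil => simp
  | cons c rest ih =>
    by_cases hc : PySem.Chars.isspace c = true
    · rw [List.dropWhile_cons_of_pos hc, ih]
      conv_rhs => rw [pvW, List.splitOnP_cons, if_pos hc]
      simp [pvW]
    · rw [List.dropWhile_cons_of_neg (by simp [hc])]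

theorem pv_pvW_strip (s : List Char) : pvW (PySem.Chars.strip s) = pvW s := by
  rw [PySem.Chars.strip]
  have rstr : ∀ t : List Char, pvW (PySem.Chars.rstrip t) = pvW t := by
    intro t
    have hdec : t = (List.dropWhile PySem.Chars.isspace t.reverse).reverse ++
        (List.takeWhile PySem.Chars.isspace t.reverse).reverse := by
      conv_lhs => rw [← List.reverse_reverse t,
        ← List.takeWhile_append_dropWhile (p := PySem.Chars.isspace) (l := t.reverse)]
      rw [List.reverse_append]
    have hall : ∀ c ∈ (List.takeWhile PySem.Chars.isspace t.reverse).reverse,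
        PySem.Chars.isspace c = true := by
      intro c hc
      exact List.mem_takeWhile_imp (by simpa using hc)
    rw [PySem.Chars.rstrip]
    conv_rhs => rw [hdec]
    rw [pv_pvW_append_allP _ hall]
  rw [rstr, PySem.Chars.lstrip, pv_pvW_dropWhile]

-- the whitespace split refines the newline split
theorem pv_splitOnP_isspace_flatten (s : List Char) :
    s.splitOnP PySem.Chars.isspace =
      ((s.splitOnP (· == '\n')).map (·.splitOnP PySem.Chars.isspace)).flatten := by
  induction s with
  | nil => simp [List.splitOnP_nil]
  | cons c rest ih =>
    rw [List.splitOnP_cons, List.splitOnP_cons (p := (· == '\n'))]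
    by_cases hq : c = '\n'
    · subst hq
      rw [if_pos (by decide), if_pos (by decide)]
      simp only [List.map_cons, List.flatten_cons, List.splitOnP_nil]
      rw [ih]
      rfl
    · rw [if_neg (show ¬((c == '\n') = true) by simp [hq])]
      obtain ⟨h, t, hht⟩ := List.exists_cons_of_ne_nil (List.splitOnP_ne_nil (· == '\n') rest)
      rw [hht]
      rw [hht] at ih
      simp only [List.map_cons, List.flatten_cons] at ih ⊢
      rw [List.modifyHead_cons]
      simp only [List.map_cons, List.flatten_cons, List.splitOnP_cons]
      by_cases hp : PySem.Chars.isspace c = true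
      · rw [if_pos hp, if_pos hp, ih]; simp
      · rw [if_neg hp, if_neg hp, ih,
          pv_modifyHead_append_left _ _ (List.splitOnP_ne_nil _ _)]

theorem pv_pvW_flatten (s : List Char) :
    pvW s = ((s.splitOnP (· == '\n')).map pvW).flatten := by
  rw [pvW, pv_splitOnP_isspace_flatten, List.filter_flatten, List.map_map]
  rfl

-- a join of nonempty words is empty iff there are no words
theorem pv_join_isEmpty {ws : List (List Char)} (h : ∀ w ∈ ws, w ≠ []) :
    (PySem.Chars.join [' '] ws).isEmpty = ws.isEmpty := by
  cases ws with
  | nil => simp [PySem.Chars.join_nil]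
  | cons a t =>
    cases t with
    | nil =>
      rw [PySem.Chars.join_singleton]
      simp [List.isEmpty_iff, h a (by simp)]
    | cons b t' =>
      rw [PySem.Chars.join_cons_cons]
      simp [List.isEmpty_iff]

theorem pv_join_append (sep : List Char) : ∀ (xs : List (List Char)) {ys : List (List Char)}, xs ≠ [] → ys ≠ [] →
    PySem.Chars.join sep (xs ++ ys) = PySem.Chars.join sep xs ++ sep ++ PySem.Chars.join sep ys := by
  intro xs
  induction xs with
  | nil => intro _ h; exact absurd rfl h
  | cons x xs' ih =>
    intro ys _ hys
    cases xs' with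
    | nil =>
      obtain ⟨y, t, rfl⟩ := List.exists_cons_of_ne_nil hys
      rw [List.singleton_append, PySem.Chars.join_cons_cons, PySem.Chars.join_singleton]
    | cons x' t =>
      rw [List.cons_append, List.cons_append, PySem.Chars.join_cons_cons,
        PySem.Chars.join_cons_cons, ← List.cons_append,
        ih (by simp) hys]
      simp [List.append_assoc]

-- joining the nonempty per-line joins = joining all the words at once
theorem pv_join_flatten : ∀ {lss : List (List (List Char))},
    (∀ ws ∈ lss, ∀ w ∈ ws, w ≠ []) →
    PySem.Chars.join [' '] ((lss.filter (fun ws => !ws.isEmpty)).map (PySem.Chars.join [' '])) =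
      PySem.Chars.join [' '] lss.flatten := by
  intro lss
  induction lss with
  | nil => intro _; simp [PySem.Chars.join_nil]
  | cons ws rest ih =>
    intro h
    have hrest : ∀ ws' ∈ rest, ∀ w ∈ ws', w ≠ [] := fun ws' h' => h ws' (List.mem_cons_of_mem _ h')
    by_cases hws : ws = []
    · subst hws
      simp only [List.flatten_cons, List.nil_append, List.filter_cons]
      rw [if_neg (by simp)]
      exact ih hrest
    · rw [List.filter_cons, if_pos (by simpa [List.isEmpty_iff] using hws),
        List.map_cons, List.flatten_cons]
      by_cases hfl : rest.flatten = []
      · have hfilter : rest.filter (fun ws => !ws.isEmpty) = [] := by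
          rw [List.filter_eq_nil_iff]
          intro ws' hmem
          have : ws' = [] := List.flatten_eq_nil_iff.mp hfl ws' hmem
          simp [this]
        rw [hfilter, hfl, List.append_nil]
        simp [PySem.Chars.join_singleton]
      · have hmapne : (rest.filter (fun ws => !ws.isEmpty)).map (PySem.Chars.join [' ']) ≠ [] := by
          obtain ⟨w, t, hwt⟩ := List.exists_cons_of_ne_nil hfl
          have hw : w ∈ rest.flatten := by simp [hwt]
          rcases List.mem_flatten.mp hw with ⟨ws', hws', hwmem⟩
          have hmem : ws' ∈ rest.filter (fun ws => !ws.isEmpty) := by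
            rw [List.mem_filter]
            refine ⟨hws', by simpa [List.isEmpty_iff] using List.ne_nil_of_mem hwmem⟩
          simp only [ne_eq, List.map_eq_nil_iff]
          intro hcon
          rw [hcon] at hmem
          simp at hmem
        rw [pv_join_append [' '] _ (by simpa using hws) hfl, ← ih hrest]
        obtain ⟨m, ms, hm⟩ := List.exists_cons_of_ne_nil hmapne
        rw [hm, PySem.Chars.join_cons_cons]

-- the per-line value of A, on the Chars side
theorem pv_lineval (l : String) :
    (PySem.Str.join " " ((PySem.Str.split₀ (PySem.Str.strip l)).filter (fun w => !pvIsNumericToken w))).toList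
      = PySem.Chars.join [' '] (pvG l.toList) := by
  have hpred : (fun w => !pvIsNumericToken w) = (pvPC ∘ String.toList) := by
    funext w; exact pvIsNumericToken_toList w
  have harg : ((PySem.Str.split₀ (PySem.Str.strip l)).filter (fun w => !pvIsNumericToken w)).map String.toList
      = pvG l.toList := by
    rw [hpred, ← List.filter_map, PySem.Str.split₀_map_toList, PySem.Str.toList_strip,
      pv_split0_eq, pv_pvW_strip]
    rfl
  rw [PySem.Str.toList_join, pv_sp_toList, harg]

theorem pv_main (text : String) : clean_section_content text = clean_section_content_alt text := by
  simp only [clean_section_content, clean_section_content_alt]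
  have hsplit : (PySem.Str.split? text "\n").getD [] =
      (text.toList.splitOnP (· == '\n')).map String.ofList := by
    rw [PySem.Str.split?, show ("\n" : String).toList = ['\n'] from rfl,
      PySem.Chars.split?, if_neg (by simp), Option.map_some, Option.getD_some, pv_splitOn_nl]
  rw [hsplit]
  have hbody : (fun (acc : List String) line =>
      if (PySem.Str.join " " ((PySem.Str.split₀ (PySem.Str.strip line)).filter (fun w => !pvIsNumericToken w))).toList.isEmpty
      then acc
      else acc ++ [PySem.Str.join " " ((PySem.Str.split₀ (PySem.Str.strip line)).filter (fun w => !pvIsNumericToken w))])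
      = (fun (acc : List String) line =>
      if (!(PySem.Str.join " " ((PySem.Str.split₀ (PySem.Str.strip line)).filter (fun w => !pvIsNumericToken w))).toList.isEmpty) = true
      then acc ++ [PySem.Str.join " " ((PySem.Str.split₀ (PySem.Str.strip line)).filter (fun w => !pvIsNumericToken w))]
      else acc) := by
    funext acc line
    by_cases h : (PySem.Str.join " " ((PySem.Str.split₀ (PySem.Str.strip line)).filter (fun w => !pvIsNumericToken w))).toList.isEmpty <;>
      simp [h]
  rw [hbody]
  rw [PySem.List.foldl_append_if
    (p := fun line => !(PySem.Str.join " " ((PySem.Str.split₀ (PySem.Str.strip line)).filter (fun w => !pvIsNumericToken w))).toList.isEmpty)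
    (f := fun line => PySem.Str.join " " ((PySem.Str.split₀ (PySem.Str.strip line)).filter (fun w => !pvIsNumericToken w)))]
  rw [List.nil_append]
  rw [PySem.Str.join, PySem.Str.join, pv_sp_toList]
  congr 1
  have hR : (((PySem.Str.split₀ text).filter (fun w => !pvIsNumericToken w)).map String.toList)
      = pvG text.toList := by
    have hpred : (fun w => !pvIsNumericToken w) = (pvPC ∘ String.toList) := by
      funext w; exact pvIsNumericToken_toList w
    rw [hpred, ← List.filter_map, PySem.Str.split₀_map_toList, pv_split0_eq]
    rfl
  rw [hR]
  rw [List.map_map]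
  have hfun : (String.toList ∘ fun line =>
      PySem.Str.join " " ((PySem.Str.split₀ (PySem.Str.strip line)).filter (fun w => !pvIsNumericToken w)))
      = (fun line : String => PySem.Chars.join [' '] (pvG line.toList)) := by
    funext l; exact pv_lineval l
  rw [hfun]
  have hpredline : (fun line : String =>
      !(PySem.Str.join " " ((PySem.Str.split₀ (PySem.Str.strip line)).filter (fun w => !pvIsNumericToken w))).toList.isEmpty)
      = (fun line : String => !(pvG line.toList).isEmpty) := by
    funext l
    rw [show (PySem.Str.join " " ((PySem.Str.split₀ (PySem.Str.strip l)).filter (fun w => !pvIsNumericToken w))).toList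
        = PySem.Chars.join [' '] (pvG l.toList) from pv_lineval l]
    rw [pv_join_isEmpty (fun w hw => pvG_ne_nil hw)]
  rw [hpredline]
  rw [show (fun line : String => !(pvG line.toList).isEmpty)
      = ((fun c : List Char => !(pvG c).isEmpty) ∘ String.toList) from rfl]
  simp only [List.map_map, List.filter_map, Function.comp_def, String.toList_ofList]
  rw [show (fun c : List Char => PySem.Chars.join [' '] (pvG c)) = (PySem.Chars.join [' '] ∘ pvG) from rfl]
  rw [show (fun c : List Char => !(pvG c).isEmpty) = ((fun ws : List (List Char) => !ws.isEmpty) ∘ pvG) from rfl]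
  rw [← List.map_map (g := PySem.Chars.join [' ']) (f := pvG), ← List.filter_map]
  rw [pv_join_flatten (by
    intro ws hws w hw
    rcases List.mem_map.mp hws with ⟨c, _, rfl⟩
    exact pvG_ne_nil hw)]
  congr 1
  rw [show List.map pvG (List.splitOnP (fun x => x == '\n') text.toList)
      = List.map (List.filter pvPC) (List.map pvW (List.splitOnP (fun x => x == '\n') text.toList)) by
    rw [List.map_map]; rfl]
  rw [← List.filter_flatten, ← pv_pvW_flatten]
  rfl

-- ===== VERDICT (by name: the statement is the Claim_ definition above) =====
theorem clean_section_content_spec : Claim_equal_clean_section_content := by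
  intro text _
  exact pv_main text
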